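-- pv_equiv track=rewrite | github.com/abl030/pfsense-mcp | generator/context_builder.py | _find_apply_info
-- ===== SOURCE A (Python) =====
-- _APPLY_SUBSYSTEMS = [
--     "/api/v2/firewall/virtual_ip",
--     "/api/v2/firewall",
--     "/api/v2/interface",
--     "/api/v2/routing",
--     "/api/v2/services/dhcp_server",
--     "/api/v2/services/dns_forwarder",
--     "/api/v2/services/dns_resolver",
--     "/api/v2/services/haproxy",
--     "/api/v2/vpn/ipsec",
--     "/api/v2/vpn/wireguard",
-- ]
--
-- def _find_apply_info(
--     path: str, method: str
-- ) -> tuple[bool, str | None, str | None]: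
--     """Determine if this operation needs an apply reminder."""
--     if method == "get":
--         return False, None, None
--
--     # Check if this path belongs to an apply subsystem
--     # Use longest-match to handle /firewall/virtual_ip vs /firewall
--     matched_prefix = None
--     for prefix in sorted(_APPLY_SUBSYSTEMS, key=len, reverse=True):
--         if path.startswith(prefix + "/") or path == prefix:
--             matched_prefix = prefix
--             break
--
--     if not matched_prefix:
--         return False, None, None
--
--     # Don't add apply reminder to the apply endpoint itself
--     if path.endswith("/apply"):
--         return False, None, None
--
--     apply_path = matched_prefix + "/apply"
--     # Build the apply tool name from the subsystem
--     subsystem = matched_prefix.replace("/api/v2/", "").replace("/", "_")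
--     apply_tool = f"pfsense_{subsystem}_apply"
--
--     return True, apply_path, apply_tool
-- ===== SOURCE B (Python) =====
-- _APPLY_SUBSYSTEMS = [
--     "/api/v2/firewall/virtual_ip",
--     "/api/v2/firewall",
--     "/api/v2/interface",
--     "/api/v2/routing",
--     "/api/v2/services/dhcp_server",
--     "/api/v2/services/dns_forwarder",
--     "/api/v2/services/dns_resolver",
--     "/api/v2/services/haproxy",
--     "/api/v2/vpn/ipsec",
--     "/api/v2/vpn/wireguard",
-- ]
--
-- _APPLY_SET = set(_APPLY_SUBSYSTEMS)
--
--
-- def _find_apply_info(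
--     path: str, method: str
-- ) -> tuple[bool, str | None, str | None]:
--     """Determine if this operation needs an apply reminder."""
--     if method == "get":
--         return False, None, None
--
--     # Walk up the path segment by segment: the first hit in the set is
--     # automatically the longest matching subsystem prefix.
--     matched_prefix = None
--     candidate = path
--     while candidate:
--         if candidate in _APPLY_SET:
--             matched_prefix = candidate
--             break
--         if "/" not in candidate:
--             break
--         candidate = candidate.rsplit("/", 1)[0]
--
--     if not matched_prefix:
--         return False, None, None
--
--     if path.endswith("/apply"):
--         return False, None, None
--
--     apply_path = matched_prefix + "/apply"
--     subsystem = matched_prefix.replace("/api/v2/", "").replace("/", "_")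
--     apply_tool = f"pfsense_{subsystem}_apply"
--
--     return True, apply_path, apply_tool
-- ===== Notes on version B (the rewrite author's own statement) =====
-- stated objective: alternative
-- what changed: Replaces the sort-prefixes-by-length-and-scan loop with a segment-trimming walk up the path tested against a set of subsystems, so the longest match is found without sorting or scanning the prefix list.
import Mathlib
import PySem

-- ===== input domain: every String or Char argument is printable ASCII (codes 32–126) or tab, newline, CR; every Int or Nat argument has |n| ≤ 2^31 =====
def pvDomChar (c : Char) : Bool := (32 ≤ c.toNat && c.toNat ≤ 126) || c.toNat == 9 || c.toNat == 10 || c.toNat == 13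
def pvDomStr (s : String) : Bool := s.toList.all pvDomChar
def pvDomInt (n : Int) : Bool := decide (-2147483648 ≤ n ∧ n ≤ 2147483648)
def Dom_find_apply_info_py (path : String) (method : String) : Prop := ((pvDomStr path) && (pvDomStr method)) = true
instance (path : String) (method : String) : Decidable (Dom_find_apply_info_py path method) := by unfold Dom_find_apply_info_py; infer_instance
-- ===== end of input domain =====

-- B replaces A's sort-by-length-and-scan over the prefix list by a segment-trimming
-- walk up the path tested against a set of subsystems (objective: alternative).

-- ===== PORT A =====
-- the module-level constant _APPLY_SUBSYSTEMS (shared by both Pythons), as char lists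
def pvSubsystems : List (List Char) :=
  ["/api/v2/firewall/virtual_ip".toList,
   "/api/v2/firewall".toList,
   "/api/v2/interface".toList,
   "/api/v2/routing".toList,
   "/api/v2/services/dhcp_server".toList,
   "/api/v2/services/dns_forwarder".toList,
   "/api/v2/services/dns_resolver".toList,
   "/api/v2/services/haproxy".toList,
   "/api/v2/vpn/ipsec".toList,
   "/api/v2/vpn/wireguard".toList]

-- sorted(_APPLY_SUBSYSTEMS, key=len, reverse=True)
def pvSortedSubs : List (List Char) :=
  PySem.List.sorted pvSubsystems (fun s => s.length) true

-- path.startswith(prefix + "/") or path == prefix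
def pvMatchA (cs p : List Char) : Bool :=
  PySem.Chars.startswith cs (p ++ ['/']) || cs == p

-- subsystem = matched.replace("/api/v2/", "").replace("/", "_"); f"pfsense_{subsystem}_apply"
-- (shared tail code of both Pythons)
def pvToolName (p : List Char) : List Char :=
  "pfsense_".toList ++
    PySem.Chars.replace (PySem.Chars.replace p "/api/v2/".toList "".toList) "/".toList "_".toList ++
    "_apply".toList

def find_apply_info_py (path : String) (method : String) : Bool × Option String × Option String :=
  if method == "get" then (false, none, none)
  else
    -- for prefix in sorted(...): if match: matched_prefix = prefix; break
    match pvSortedSubs.find? (fun p => pvMatchA path.toList p) with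
    | none => (false, none, none)
    | some mp =>
      if PySem.Chars.endswith path.toList "/apply".toList then (false, none, none)
      else (true, some (String.ofList (mp ++ "/apply".toList)), some (String.ofList (pvToolName mp)))

-- ===== PORT B =====
-- _APPLY_SET = set(_APPLY_SUBSYSTEMS)
def pvApplySet : PySem.Set (List Char) := PySem.Set.ofList pvSubsystems

-- candidate.rsplit("/", 1)[0]: everything before the LAST '/'; hand port (no PySem rsplit),
-- exact when '/' occurs in cs (the only situation B calls it in)
def pvDropSeg (cs : List Char) : List Char :=
  ((cs.reverse.dropWhile (fun c => !(c == '/'))).tail).reverse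

theorem pvDropSeg_length_lt (cs : List Char) (h : '/' ∈ cs) :
    (pvDropSeg cs).length < cs.length := by
  have hmem : '/' ∈ cs.reverse := by simpa using h
  have hne : cs.reverse.dropWhile (fun c => !(c == '/')) ≠ [] := by
    intro hnil
    have := List.dropWhile_eq_nil_iff.mp hnil '/' hmem
    simp at this
  have h1 : (cs.reverse.dropWhile (fun c => !(c == '/'))).tail.length
      < (cs.reverse.dropWhile (fun c => !(c == '/'))).length := by
    cases hcase : cs.reverse.dropWhile (fun c => !(c == '/')) with
    | nil => exact absurd hcase hne
    | cons a t => simp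
  have h2 : (cs.reverse.dropWhile (fun c => !(c == '/'))).length ≤ cs.length := by
    simpa using List.length_dropWhile_le (fun c => !(c == '/')) cs.reverse
  simp only [pvDropSeg, List.length_reverse]
  omega

-- while candidate: if candidate in _APPLY_SET: break; if '/' not in candidate: break; trim
def pvTrim (cs : List Char) : Option (List Char) :=
  if cs = [] then none
  else if pvApplySet.contains cs then some cs
  else if PySem.Chars.isIn ['/'] cs then pvTrim (pvDropSeg cs)
  else none
termination_by cs.length
decreasing_by
  exact pvDropSeg_length_lt cs ((List.singleton_infix_iff _ _).mp ((PySem.Chars.isIn_iff_infix _ _).mp (by assumption)))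

def find_apply_info_py_alt (path : String) (method : String) : Bool × Option String × Option String :=
  if method == "get" then (false, none, none)
  else
    match pvTrim path.toList with
    | none => (false, none, none)
    | some mp =>
      if PySem.Chars.endswith path.toList "/apply".toList then (false, none, none)
      else (true, some (String.ofList (mp ++ "/apply".toList)), some (String.ofList (pvToolName mp)))

-- ===== PRECONDITION & SPEC =====
def Spec_find_apply_info_py (path : String) (method : String) (out : Bool × Option String × Option String) : Prop := out = find_apply_info_py_alt path method
instance (path : String) (method : String) (out : Bool × Option String × Option String) : Decidable (Spec_find_apply_info_py path method out) := by unfold Spec_find_apply_info_py; infer_instance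

-- ===== CLAIM (what is proved, stated in full; the proofs are below) =====
def Claim_equal_find_apply_info_py : Prop := ∀ (path : String) (method : String), Dom_find_apply_info_py path method → Spec_find_apply_info_py path method (find_apply_info_py path method)

-- ===== LEMMAS AND PROOFS =====

-- p is a slash-aligned ancestor of cs (p = cs, or cs continues after p with a '/')
def pvAnc (p cs : List Char) : Prop := cs = p ∨ ∃ r, cs = p ++ '/' :: r

theorem pvMatchA_iff (cs p : List Char) : pvMatchA cs p = true ↔ pvAnc p cs := by
  unfold pvMatchA pvAnc
  rw [Bool.or_eq_true, PySem.Chars.startswith_iff, beq_iff_eq]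
  constructor
  · rintro (⟨t, ht⟩ | h)
    · exact Or.inr ⟨t, by simpa using ht.symm⟩
    · exact Or.inl h
  · rintro (h | ⟨r, hr⟩)
    · exact Or.inr h
    · exact Or.inl ⟨r, by simpa using hr.symm⟩

theorem pvAnc_trans (p d cs : List Char) (h1 : pvAnc p d) (h2 : pvAnc d cs) : pvAnc p cs := by
  rcases h1 with h1 | ⟨r1, hr1⟩ <;> rcases h2 with h2 | ⟨r2, hr2⟩
  · exact Or.inl (h2.trans h1)
  · exact Or.inr ⟨r2, by rw [hr2, h1]⟩
  · exact Or.inr ⟨r1, by rw [h2, hr1]⟩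
  · exact Or.inr ⟨r1 ++ '/' :: r2, by rw [hr2, hr1]; simp⟩

theorem pvContains_iff (cs : List Char) : pvApplySet.contains cs = true ↔ cs ∈ pvSubsystems := by
  simp [pvApplySet, PySem.Set.contains]

theorem pvDropSeg_spec (cs : List Char) (h : '/' ∈ cs) :
    ∃ seg, cs = pvDropSeg cs ++ '/' :: seg ∧ '/' ∉ seg := by
  have hmem : '/' ∈ cs.reverse := by simpa using h
  have hne : cs.reverse.dropWhile (fun c => !(c == '/')) ≠ [] := by
    intro hnil
    have := List.dropWhile_eq_nil_iff.mp hnil '/' hmem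
    simp at this
  obtain ⟨a, t, hdrop⟩ := List.exists_cons_of_ne_nil hne
  have ha : a = '/' := by
    have hne' : cs.reverse.dropWhile (fun c => !(c == '/')) ≠ [] := by rw [hdrop]; simp
    have hhd := List.head_dropWhile_not (p := fun c => !(c == '/')) (l := cs.reverse) hne'
    have h1 : (cs.reverse.dropWhile (fun c => !(c == '/'))).head? = some a := by rw [hdrop]; rfl
    rw [List.head?_eq_some_head hne'] at h1
    have h2 := Option.some.inj h1
    rw [h2] at hhd
    simpa using hhd
  subst ha
  have hd : pvDropSeg cs = t.reverse := by simp [pvDropSeg, hdrop]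
  refine ⟨(cs.reverse.takeWhile (fun c => !(c == '/'))).reverse, ?_, ?_⟩
  · rw [hd]
    have hsplit : cs.reverse.takeWhile (fun c => !(c == '/')) ++ '/' :: t = cs.reverse := by
      rw [← hdrop]; exact List.takeWhile_append_dropWhile
    calc cs = cs.reverse.reverse := by simp
      _ = (cs.reverse.takeWhile (fun c => !(c == '/')) ++ '/' :: t).reverse := by rw [hsplit]
      _ = t.reverse ++ '/' :: (cs.reverse.takeWhile (fun c => !(c == '/'))).reverse := by simp
  · intro hcontra
    have := List.mem_takeWhile_imp (by simpa using hcontra)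
    simp at this

-- two slash decompositions of the same list, the right one ending in a slash-free
-- segment, make the left stem an ancestor of the right stem
theorem pvAnc_of_two_decomp (p r d seg : List Char)
    (heq : p ++ '/' :: r = d ++ '/' :: seg) (hnos : '/' ∉ seg) : pvAnc p d := by
  have hple : p.length ≤ d.length := by
    by_contra hlt
    push Not at hlt
    have hL : (p ++ '/' :: r)[p.length]? = some '/' := by
      rw [List.getElem?_append_right (le_refl p.length)]; simp
    have hR : (d ++ '/' :: seg)[p.length]? = seg[p.length - d.length - 1]? := by
      rw [List.getElem?_append_right (by omega : d.length ≤ p.length)]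
      have hi : p.length - d.length = (p.length - d.length - 1) + 1 := by omega
      conv_lhs => rw [hi]
      rw [List.getElem?_cons_succ]
    rw [heq, hR] at hL
    exact hnos (List.mem_of_getElem? hL)
  rcases Nat.eq_or_lt_of_le hple with hleq | hlt
  · left
    have h1 : (p ++ '/' :: r).take p.length = p := List.take_left
    have h2 : (d ++ '/' :: seg).take d.length = d := List.take_left
    rw [← h2, ← hleq, ← heq, h1]
  · right
    refine ⟨r.take (d.length - p.length - 1), ?_⟩
    have h2 : (d ++ '/' :: seg).take d.length = d := List.take_left
    have hk : d.length = p.length + ((d.length - p.length - 1) + 1) := by omega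
    rw [← h2, ← heq, hk, List.take_length_add_append]
    simp

theorem pvAnc_dropSeg (p cs : List Char) (h : pvAnc p cs) (hne : cs ≠ p) :
    '/' ∈ cs ∧ pvAnc p (pvDropSeg cs) := by
  rcases h with h | ⟨r, hr⟩
  · exact absurd h hne
  have hmem : '/' ∈ cs := by rw [hr]; simp
  refine ⟨hmem, ?_⟩
  obtain ⟨seg, hseg, hnos⟩ := pvDropSeg_spec cs hmem
  exact pvAnc_of_two_decomp p r (pvDropSeg cs) seg (hr ▸ hseg) hnos

theorem pvTrim_sound (cs c : List Char) (h : pvTrim cs = some c) :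
    pvAnc c cs ∧ c ∈ pvSubsystems := by
  induction cs using pvTrim.induct with
  | case1 => rw [pvTrim] at h; simp at h
  | case2 cs hnil hcont =>
    rw [pvTrim, if_neg hnil, if_pos hcont] at h
    obtain rfl : cs = c := by injection h
    exact ⟨Or.inl rfl, (pvContains_iff _).mp hcont⟩
  | case3 cs hnil hcont hslash ih =>
    rw [pvTrim, if_neg hnil, if_neg hcont, if_pos hslash] at h
    obtain ⟨ha, hm⟩ := ih h
    have hsl : '/' ∈ cs :=
      (List.singleton_infix_iff _ _).mp ((PySem.Chars.isIn_iff_infix _ _).mp hslash)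
    obtain ⟨seg, hseg, _⟩ := pvDropSeg_spec cs hsl
    exact ⟨pvAnc_trans c (pvDropSeg cs) cs ha (Or.inr ⟨seg, hseg⟩), hm⟩
  | case4 cs hnil hcont hslash =>
    rw [pvTrim, if_neg hnil, if_neg hcont, if_neg hslash] at h
    simp at h

theorem pvTrim_complete (cs p : List Char) (hp : p ∈ pvSubsystems) (h : pvAnc p cs) :
    ∃ c, pvTrim cs = some c ∧ pvAnc p c := by
  induction cs using pvTrim.induct with
  | case1 =>
    rcases h with h | ⟨r, hr⟩
    · rw [← h] at hp
      exact absurd hp (by decide)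
    · simp at hr
  | case2 cs hnil hcont =>
    exact ⟨cs, by rw [pvTrim, if_neg hnil, if_pos hcont], h⟩
  | case3 cs hnil hcont hslash ih =>
    have hne : cs ≠ p := by
      intro hcp
      exact hcont ((pvContains_iff cs).mpr (hcp ▸ hp))
    obtain ⟨-, ha⟩ := pvAnc_dropSeg p cs h hne
    obtain ⟨c, hc, hac⟩ := ih ha
    exact ⟨c, by rw [pvTrim, if_neg hnil, if_neg hcont, if_pos hslash]; exact hc, hac⟩
  | case4 cs hnil hcont hslash =>
    have hne : cs ≠ p := by
      intro hcp
      exact hcont ((pvContains_iff cs).mpr (hcp ▸ hp))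
    obtain ⟨hsl, -⟩ := pvAnc_dropSeg p cs h hne
    exact absurd ((PySem.Chars.isIn_iff_infix _ _).mpr ((List.singleton_infix_iff _ _).mpr hsl))
      hslash

theorem pvFind_longest (l : List (List Char)) (hl : l.Pairwise (fun a b => b.length ≤ a.length))
    (f : List Char → Bool) (p c : List Char) (hf : l.find? f = some p)
    (hc : c ∈ l) (hfc : f c = true) : c.length ≤ p.length := by
  induction l with
  | nil => simp at hf
  | cons a t ih =>
    rw [List.find?_cons] at hf
    rcases List.pairwise_cons.mp hl with ⟨ha, ht⟩
    cases hfa : f a with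
    | true =>
      rw [hfa] at hf; simp at hf; subst hf
      rcases List.mem_cons.mp hc with rfl | hct
      · exact le_refl _
      · exact ha c hct
    | false =>
      rw [hfa] at hf; simp at hf
      rcases List.mem_cons.mp hc with rfl | hct
      · rw [hfa] at hfc; exact absurd hfc (by simp)
      · exact ih ht hf hct

theorem pvAnc_eq_of_le (p c : List Char) (h : pvAnc p c) (hlen : c.length ≤ p.length) : p = c := by
  rcases h with h | ⟨r, hr⟩
  · exact h.symm
  · subst hr; simp at hlen

theorem pvSorted_pairwise : pvSortedSubs.Pairwise (fun a b => b.length ≤ a.length) :=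
  PySem.List.sorted_pairwise_rev pvSubsystems (fun s => s.length)

theorem pvMain (cs : List Char) :
    (pvSortedSubs.find? (fun p => pvMatchA cs p)) = pvTrim cs := by
  have hperm := PySem.List.sorted_perm pvSubsystems (fun s => s.length) true
  cases htrim : pvTrim cs with
  | none =>
    rw [List.find?_eq_none]
    intro x hx hfx
    have hanc := (pvMatchA_iff cs x).mp hfx
    have hxm : x ∈ pvSubsystems := hperm.mem_iff.mp hx
    obtain ⟨c, hc, _⟩ := pvTrim_complete cs x hxm hanc
    rw [htrim] at hc; exact absurd hc (by simp)
  | some c =>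
    obtain ⟨hanc, hcm⟩ := pvTrim_sound cs c htrim
    have hcs : c ∈ pvSortedSubs := hperm.mem_iff.mpr hcm
    have hfc : pvMatchA cs c = true := (pvMatchA_iff cs c).mpr hanc
    cases hfind : pvSortedSubs.find? (fun p => pvMatchA cs p) with
    | none =>
      exact absurd hfc (by simpa using List.find?_eq_none.mp hfind c hcs)
    | some p =>
      have hfp : pvMatchA cs p = true := List.find?_some hfind
      have hpm : p ∈ pvSubsystems := hperm.mem_iff.mp (List.mem_of_find?_eq_some hfind)
      have hancp := (pvMatchA_iff cs p).mp hfp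
      obtain ⟨c', hc', hanc'⟩ := pvTrim_complete cs p hpm hancp
      rw [htrim] at hc'
      have hcc : c' = c := (Option.some.inj hc').symm
      subst hcc
      have hlen : c'.length ≤ p.length := pvFind_longest _ pvSorted_pairwise _ p c' hfind hcs hfc
      rw [pvAnc_eq_of_le p c' hanc' hlen]

-- ===== VERDICT (by name: the statement is the Claim_ definition above) =====
theorem find_apply_info_py_spec : Claim_equal_find_apply_info_py := by
  intro path method _
  unfold Spec_find_apply_info_py find_apply_info_py find_apply_info_py_alt
  rw [pvMain path.toList]
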